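-- pv_equiv track=rewrite | github.com/EONASH2722/MORICE | morice/core.py | wants_web_capability
-- ===== SOURCE A (Python) =====
-- def wants_web_capability(text: str) -> bool:
--     lowered = text.lower()
--     return any(
--         phrase in lowered
--         for phrase in {
--             "go online",
--             "browse the web",
--             "search the web",
--             "look up",
--             "google",
--             "web search",
--         }
--     )
-- ===== SOURCE B (Python) =====
-- def wants_web_capability(text: str) -> bool:
--     t = text.lower()
--     phrases = ("go online", "browse the web", "search the web",
--                "look up", "google", "web search")
--     for i in range(len(t)):
--         if any(t.startswith(p, i) for p in phrases):
--             return True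
--     return False
-- ===== Notes on version B (the rewrite author's own statement) =====
-- stated objective: alternative
-- what changed: Replaced six independent substring-containment scans with one left-to-right pass over the lowered text that tests all six phrases as prefixes at each position.
import Mathlib
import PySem

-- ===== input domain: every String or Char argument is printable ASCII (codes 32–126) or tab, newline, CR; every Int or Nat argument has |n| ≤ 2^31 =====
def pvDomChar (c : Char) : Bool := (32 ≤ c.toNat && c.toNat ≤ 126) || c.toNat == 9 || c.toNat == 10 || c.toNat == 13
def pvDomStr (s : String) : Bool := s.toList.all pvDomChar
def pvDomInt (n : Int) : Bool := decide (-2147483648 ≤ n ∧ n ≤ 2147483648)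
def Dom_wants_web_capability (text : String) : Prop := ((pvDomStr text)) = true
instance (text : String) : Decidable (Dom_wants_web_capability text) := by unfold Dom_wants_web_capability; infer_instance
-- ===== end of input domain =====

-- B replaces A's six per-phrase substring scans by one position-driven pass testing the
-- six phrases as prefixes at each index (alternative decomposition; return value proved equal).

-- ===== PORT A =====
-- Python iterates a set literal; `any` of membership tests is order-independent, so the
-- set is ported as the list of phrases in written order.
def wants_web_capability (text : String) : Bool :=
  let lowered := PySem.Str.lower text
  ["go online", "browse the web", "search the web",
   "look up", "google", "web search"].any
    (fun phrase => PySem.Str.isIn phrase lowered)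

-- ===== PORT B =====
def pvPhrases : List (List Char) :=
  ["go online".toList, "browse the web".toList, "search the web".toList,
   "look up".toList, "google".toList, "web search".toList]

-- the 'for i in range(len(t))' loop: recursion over suffixes of t;
-- t.startswith(p, i) is startswith on the suffix t[i:]
def pvScan (cs : List Char) : Bool :=
  match cs with
  | [] => false
  | _ :: rest =>
    (pvPhrases.any (fun p => PySem.Chars.startswith cs p)) || pvScan rest

def wants_web_capability_alt (text : String) : Bool :=
  pvScan (PySem.Chars.lower text.toList)

-- ===== PRECONDITION & SPEC =====
def Spec_wants_web_capability (text : String) (out : Bool) : Prop := out = wants_web_capability_alt text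
instance (text : String) (out : Bool) : Decidable (Spec_wants_web_capability text out) := by unfold Spec_wants_web_capability; infer_instance

-- ===== CLAIM (what is proved, stated in full; the proofs are below) =====
def Claim_equal_wants_web_capability : Prop := ∀ (text : String), Dom_wants_web_capability text → Spec_wants_web_capability text (wants_web_capability text)

-- ===== LEMMAS AND PROOFS =====

lemma pvIsIn_cons (p : List Char) (c : Char) (cs : List Char) :
    PySem.Chars.isIn p (c :: cs) =
      (PySem.Chars.startswith (c :: cs) p || PySem.Chars.isIn p cs) := by
  rcases h : (PySem.Chars.startswith (c :: cs) p || PySem.Chars.isIn p cs) with _ | _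
  · simp only [Bool.or_eq_false_iff] at h
    rw [PySem.Chars.isIn_eq_false_iff, List.infix_cons_iff]
    push Not
    exact ⟨by rw [← PySem.Chars.startswith_iff]; simp [h.1],
           by rw [← PySem.Chars.isIn_iff_infix]; simp [h.2]⟩
  · rw [PySem.Chars.isIn_iff_infix, List.infix_cons_iff]
    rcases Bool.or_eq_true_iff.mp h with h' | h'
    · exact Or.inl (by rw [← PySem.Chars.startswith_iff]; exact h')
    · exact Or.inr (by rw [← PySem.Chars.isIn_iff_infix]; exact h')

lemma pvScan_eq_any_isIn (cs : List Char) :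
    pvScan cs = pvPhrases.any (fun p => PySem.Chars.isIn p cs) := by
  induction cs with
  | nil => decide
  | cons c rest ih =>
    rw [pvScan, ih]
    simp only [pvIsIn_cons]
    simp only [pvPhrases, List.any_cons, List.any_nil]
    simp only [Bool.or_false]
    generalize PySem.Chars.startswith (c :: rest) "go online".toList = a1
    generalize PySem.Chars.startswith (c :: rest) "browse the web".toList = a2
    generalize PySem.Chars.startswith (c :: rest) "search the web".toList = a3
    generalize PySem.Chars.startswith (c :: rest) "look up".toList = a4
    generalize PySem.Chars.startswith (c :: rest) "google".toList = a5
    generalize PySem.Chars.startswith (c :: rest) "web search".toList = a6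
    generalize PySem.Chars.isIn "go online".toList rest = b1
    generalize PySem.Chars.isIn "browse the web".toList rest = b2
    generalize PySem.Chars.isIn "search the web".toList rest = b3
    generalize PySem.Chars.isIn "look up".toList rest = b4
    generalize PySem.Chars.isIn "google".toList rest = b5
    generalize PySem.Chars.isIn "web search".toList rest = b6
    ac_rfl

-- ===== VERDICT (by name: the statement is the Claim_ definition above) =====
theorem wants_web_capability_spec : Claim_equal_wants_web_capability := by
  intro text _
  unfold Spec_wants_web_capability wants_web_capability wants_web_capability_alt
  rw [pvScan_eq_any_isIn]
  simp [pvPhrases, PySem.Str.isIn, PySem.Str.lower]
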